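-- pv_equiv track=rewrite | github.com/SiyeolJung/UNIST_MVL | face_emotion_recognition/compare_the_emotion.py | count_each_emotion
-- ===== SOURCE A (Python) =====
-- def count_each_emotion(emotion_list):
--     count_emotion = {
--         'Anger': 0,
--         'Contempt': 0,
--         'Disgust': 0,
--         'Fear': 0,
--         'Happiness': 0,
--         'Neutral': 0,
--         'Sadness': 0,
--         'Surprise': 0
--     }
--     for emotion in emotion_list:
--         e = emotion
--         for key in range(len(e)):
--             if e[key] in count_emotion:
--                 count_emotion[e[key]] +=1
--
--     return count_emotion
-- ===== SOURCE B (Python) =====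
-- def count_each_emotion(emotion_list):
--     # count-per-key: for each fixed emotion, total its occurrences across all
--     # inner lists with list.count, instead of a guarded increment per element
--     keys = ('Anger', 'Contempt', 'Disgust', 'Fear',
--             'Happiness', 'Neutral', 'Sadness', 'Surprise')
--     return {k: sum(e.count(k) for e in emotion_list) for k in keys}
-- ===== Notes on version B (the rewrite author's own statement) =====
-- stated objective: idiomatic
-- what changed: Replaces the per-element membership-guarded increment over an index loop by a per-key pass: for each of the eight fixed emotions, sum e.count(key) over the inner lists and build the dict in one comprehension.
import Mathlib
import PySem

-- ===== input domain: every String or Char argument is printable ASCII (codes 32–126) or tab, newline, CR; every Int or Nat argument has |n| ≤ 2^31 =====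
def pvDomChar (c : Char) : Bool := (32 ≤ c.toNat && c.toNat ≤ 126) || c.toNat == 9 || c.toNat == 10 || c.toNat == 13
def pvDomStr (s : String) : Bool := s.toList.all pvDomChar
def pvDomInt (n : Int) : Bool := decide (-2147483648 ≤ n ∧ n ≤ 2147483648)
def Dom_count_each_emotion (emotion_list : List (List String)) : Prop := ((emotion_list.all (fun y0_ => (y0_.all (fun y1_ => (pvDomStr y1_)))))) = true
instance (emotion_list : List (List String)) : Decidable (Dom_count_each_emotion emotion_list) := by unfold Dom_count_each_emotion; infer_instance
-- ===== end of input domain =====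

-- B replaces A's per-element membership-guarded increment by a per-key counting pass (idiomatic decomposition, same cost).

-- ===== PORT A =====
def pvInit : PySem.Dict String Int :=
  PySem.Dict.ofList
    [("Anger", 0), ("Contempt", 0), ("Disgust", 0), ("Fear", 0),
     ("Happiness", 0), ("Neutral", 0), ("Sadness", 0), ("Surprise", 0)]

def count_each_emotion (emotion_list : List (List String)) : List (String × Int) :=
  (emotion_list.foldl
    (fun d e =>
      -- for key in range(len(e)): if e[key] in count_emotion: count_emotion[e[key]] += 1
      (PySem.List.pyRange 0 (PySem.List.len e) 1).foldl
        (fun d key =>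
          if d.contains (PySem.List.pyGetD e key "") then
            d.modify (PySem.List.pyGetD e key "") 0 (· + 1)
          else d)
        d)
    pvInit).items

-- ===== PORT B =====
def pvKeys : List String :=
  ["Anger", "Contempt", "Disgust", "Fear", "Happiness", "Neutral", "Sadness", "Surprise"]

def count_each_emotion_alt (emotion_list : List (List String)) : List (String × Int) :=
  pvKeys.map (fun k => (k, (emotion_list.map (fun e => (PySem.List.count e k : Int))).sum))

-- ===== PRECONDITION & SPEC =====
def Spec_count_each_emotion (emotion_list : List (List String)) (out : List (String × Int)) : Prop := out = count_each_emotion_alt emotion_list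
instance (emotion_list : List (List String)) (out : List (String × Int)) : Decidable (Spec_count_each_emotion emotion_list out) := by unfold Spec_count_each_emotion; infer_instance

-- ===== CLAIM (what is proved, stated in full; the proofs are below) =====
def Claim_equal_count_each_emotion : Prop := ∀ (emotion_list : List (List String)), Dom_count_each_emotion emotion_list → Spec_count_each_emotion emotion_list (count_each_emotion emotion_list)

-- ===== LEMMAS AND PROOFS =====

def pvStep (d : PySem.Dict String Int) (x : String) : PySem.Dict String Int :=
  if d.contains x then d.modify x 0 (· + 1) else d

theorem pvStep_keys (d : PySem.Dict String Int) (x : String) :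
    (pvStep d x).keys = d.keys := by
  unfold pvStep
  split_ifs with h
  · simp only [PySem.Dict.modify]
    exact PySem.Dict.keys_insert_of_contains _ _ h
  · rfl

theorem pvFold_keys (xs : List String) (d : PySem.Dict String Int) :
    (xs.foldl pvStep d).keys = d.keys := by
  induction xs generalizing d with
  | nil => rfl
  | cons x xs ih => simp [List.foldl_cons, ih, pvStep_keys]

theorem pvFold_getD (xs : List String) (d : PySem.Dict String Int) (k : String)
    (hk : d.contains k = true) :
    (xs.foldl pvStep d).getD k 0 = d.getD k 0 + xs.count k := by
  induction xs generalizing d with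
  | nil => simp
  | cons x xs ih =>
    have hcont : (pvStep d x).contains k = true := by
      rw [PySem.Dict.contains_eq_decide_mem_keys, pvStep_keys,
        ← PySem.Dict.contains_eq_decide_mem_keys]
      exact hk
    rw [List.foldl_cons, ih _ hcont]
    by_cases hxk : x = k
    · subst hxk
      unfold pvStep
      rw [if_pos hk, PySem.Dict.getD_modify_self]
      simp
      ring
    · have : (pvStep d x).getD k 0 = d.getD k 0 := by
        unfold pvStep
        split_ifs with h
        · exact PySem.Dict.getD_modify_of_ne _ _ _ (fun he => hxk he.symm)
        · rfl
      rw [this]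
      simp [hxk]

theorem pvInit_keys : pvInit.keys = pvKeys := by decide

theorem pvInit_nodup : pvInit.keys.Nodup := by decide

theorem pvInit_getD (k : String) (hk : k ∈ pvKeys) : pvInit.getD k 0 = 0 := by
  fin_cases hk <;> decide

theorem pvInit_contains (k : String) (hk : k ∈ pvKeys) : pvInit.contains k = true := by
  rw [PySem.Dict.contains_eq_decide_mem_keys, pvInit_keys]
  simpa using hk

theorem pvSum_counts (el : List (List String)) (k : String) :
    (el.map (fun e => (PySem.List.count e k : Int))).sum = (el.flatten.count k : Int) := by
  induction el with
  | nil => simp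
  | cons e el ih =>
    simp only [PySem.List.count_eq] at ih ⊢
    simp only [List.map_cons, List.sum_cons, List.flatten_cons, List.count_append, ih]
    push_cast; ring

theorem count_each_emotion_spec : Claim_equal_count_each_emotion := by
  intro el _
  unfold Spec_count_each_emotion count_each_emotion count_each_emotion_alt
  have hinner : ∀ (d : PySem.Dict String Int) (e : List String),
      (PySem.List.pyRange 0 (PySem.List.len e) 1).foldl
        (fun d key =>
          if d.contains (PySem.List.pyGetD e key "") then
            d.modify (PySem.List.pyGetD e key "") 0 (· + 1)
          else d) d
      = e.foldl pvStep d := by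
    intro d e
    simpa [pvStep] using
      PySem.List.foldl_pyRange_zero_pyGetD' e "" (fun d x =>
        if d.contains x then d.modify x 0 (· + 1) else d) d
  simp only [hinner]
  rw [← List.foldl_flatten]
  have hkeys : (el.flatten.foldl pvStep pvInit).keys = pvKeys := by
    rw [pvFold_keys, pvInit_keys]
  have hnodup : (el.flatten.foldl pvStep pvInit).keys.Nodup := by
    rw [hkeys]; rw [← pvInit_keys]; exact pvInit_nodup
  rw [PySem.Dict.items_eq_map_keys _ hnodup 0, hkeys]
  apply List.map_congr_left
  intro k hk
  rw [pvFold_getD _ _ _ (pvInit_contains k hk), pvInit_getD k hk, pvSum_counts]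
  simp
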